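-- pv_equiv track=rewrite | github.com/gohdong/algorithm | baekjoon/1316.py | check_group_voca
-- ===== SOURCE A (Python) =====
-- def check_group_voca(getstr):
-- 	used_char = []
-- 	if len(getstr)==0:
-- 		return True
-- 	for x in range(1,len(getstr)):
-- 		if getstr[x] not in used_char:
-- 			if getstr[x] != getstr[x-1]:
-- 				used_char.append(getstr[x-1])
-- 		else:
-- 			return False
--
-- 	return True
-- ===== SOURCE B (Python) =====
-- def check_group_voca(getstr):
--     # Two-phase: compress maximal runs to their keys, then check all keys distinct.
--     keys = []
--     for c in getstr:
--         if not keys or keys[-1] != c: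
--             keys.append(c)
--     return len(keys) == len(set(keys))
-- ===== Notes on version B (the rewrite author's own statement) =====
-- stated objective: simpler
-- what changed: B replaces A's single interleaved boundary scan (indexing x/x-1 with early return and a seen-list membership test) by a two-phase run-length compression of the string followed by one set-based distinctness check on the run keys.
import Mathlib
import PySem

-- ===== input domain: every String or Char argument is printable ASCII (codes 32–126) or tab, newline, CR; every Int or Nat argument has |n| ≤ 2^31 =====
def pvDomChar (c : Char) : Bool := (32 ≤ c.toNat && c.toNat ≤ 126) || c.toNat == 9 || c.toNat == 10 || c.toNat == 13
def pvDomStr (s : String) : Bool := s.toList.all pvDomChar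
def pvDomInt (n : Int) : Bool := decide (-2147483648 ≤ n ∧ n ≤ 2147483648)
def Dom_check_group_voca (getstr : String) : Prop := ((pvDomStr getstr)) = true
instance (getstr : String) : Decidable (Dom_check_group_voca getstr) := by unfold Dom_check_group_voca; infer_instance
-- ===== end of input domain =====

-- B re-implements A's group-word check as run-compression followed by a distinctness check (objective: simpler).


-- ===== PORT A =====
-- A's loop 'for x in range(1, len(getstr))' reads getstr[x] (cur) and getstr[x-1] (prev),
-- both always in range; it is rendered as the obvious recursion carrying prev and the rest,
-- with the same used_char accumulator and the same early return False.
def checkGroupVocaLoopA : List Char → Char → List Char → Bool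
  | [], _, _ => true
  | cur :: rest, prev, used_char =>
      if ¬ used_char.contains cur then
        if cur ≠ prev then checkGroupVocaLoopA rest cur (used_char ++ [prev])
        else checkGroupVocaLoopA rest cur used_char
      else false

def check_group_voca (getstr : String) : Bool :=
  match getstr.toList with
  | [] => true            -- if len(getstr)==0: return True
  | c :: cs => checkGroupVocaLoopA cs c []

-- ===== PORT B =====
-- Source B's compression loop: append c when keys is empty or keys[-1] != c.
def checkGroupVocaStepB (keys : List Char) (c : Char) : List Char :=
  if keys.getLast? = some c then keys else keys ++ [c]

def check_group_voca_alt (getstr : String) : Bool :=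
  let keys := getstr.toList.foldl checkGroupVocaStepB []
  keys.length == (PySem.Set.ofList keys).length

-- ===== PRECONDITION & SPEC =====
def Spec_check_group_voca (getstr : String) (out : Bool) : Prop := out = check_group_voca_alt getstr
instance (getstr : String) (out : Bool) : Decidable (Spec_check_group_voca getstr out) := by unfold Spec_check_group_voca; infer_instance

-- ===== CLAIM (what is proved, stated in full; the proofs are below) =====
def Claim_equal_check_group_voca : Prop := ∀ (getstr : String), Dom_check_group_voca getstr → Spec_check_group_voca getstr (check_group_voca getstr)

-- ===== LEMMAS AND PROOFS =====

-- the run-key list of prev :: cs (B's compression, seeded with [prev])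
def pvRuns (prev : Char) (cs : List Char) : List Char := cs.foldl checkGroupVocaStepB [prev]

-- the foldl only looks at the last element of the accumulator
theorem pvFoldB_append (cs : List Char) : ∀ (K : List Char) (p : Char),
    cs.foldl checkGroupVocaStepB (K ++ [p]) = K ++ cs.foldl checkGroupVocaStepB [p] := by
  induction cs with
  | nil => intro K p; simp
  | cons c cs ih =>
    intro K p
    simp only [List.foldl_cons]
    by_cases hpc : p = c
    · have h1 : checkGroupVocaStepB (K ++ [p]) c = K ++ [p] := by
        simp [checkGroupVocaStepB, hpc]
      have h2 : checkGroupVocaStepB [p] c = [p] := by simp [checkGroupVocaStepB, hpc]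
      rw [h1, h2, ih]
    · have h1 : checkGroupVocaStepB (K ++ [p]) c = (K ++ [p]) ++ [c] := by
        simp [checkGroupVocaStepB, hpc]
      have h2 : checkGroupVocaStepB [p] c = [p] ++ [c] := by simp [checkGroupVocaStepB, hpc]
      rw [h1, h2, ih (K ++ [p]) c, ih [p] c, List.append_assoc]

theorem pvRuns_cons (p c : Char) (cs : List Char) :
    pvRuns p (c :: cs) = if p = c then pvRuns p cs else p :: pvRuns c cs := by
  unfold pvRuns
  by_cases h : p = c
  · simp [checkGroupVocaStepB, h]
  · have : checkGroupVocaStepB [p] c = [p] ++ [c] := by simp [checkGroupVocaStepB, h]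
    simp only [List.foldl_cons, this, h, if_false]
    exact pvFoldB_append cs [p] c

theorem pvRuns_head (cs : List Char) : ∀ p, ∃ t, pvRuns p cs = p :: t := by
  induction cs with
  | nil => intro p; exact ⟨[], rfl⟩
  | cons c cs ih =>
    intro p
    rw [pvRuns_cons]
    by_cases h : p = c
    · simpa [h] using ih p
    · exact ⟨pvRuns c cs, by simp [h]⟩

-- main invariant: A's loop decides Nodup of (used ++ run keys of prev::rest)
theorem pvNodupSnoc (used : List Char) (prev : Char) (hn : used.Nodup) (hp : prev ∉ used) :
    (used ++ [prev]).Nodup := by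
  rw [List.nodup_append]
  exact ⟨hn, List.nodup_singleton _, fun a ha b hb => by simp at hb; exact fun h => hp ((h.trans hb) ▸ ha)⟩

theorem pvLoopA_cons (cur prev : Char) (rest used : List Char) :
    checkGroupVocaLoopA (cur :: rest) prev used =
      if cur ∈ used then false
      else if cur = prev then checkGroupVocaLoopA rest cur used
      else checkGroupVocaLoopA rest cur (used ++ [prev]) := by
  rw [checkGroupVocaLoopA]
  by_cases h : cur ∈ used
  · simp [h]
  · by_cases h2 : cur = prev <;> simp [h, h2]

theorem pvLoopA_eq (cs : List Char) : ∀ (prev : Char) (used : List Char),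
    used.Nodup → prev ∉ used →
    checkGroupVocaLoopA cs prev used = decide (used ++ pvRuns prev cs).Nodup := by
  induction cs with
  | nil =>
    intro prev used hn hp
    have : (used ++ pvRuns prev []).Nodup := by
      simpa [pvRuns] using pvNodupSnoc used prev hn hp
    simp [checkGroupVocaLoopA, this]
  | cons c cs ih =>
    intro prev used hn hp
    rw [pvLoopA_cons]
    by_cases hc : c ∈ used
    · -- A returns False; c occurs in used and heads a run key, so not Nodup
      have hmem : c ∈ pvRuns prev (c :: cs) := by
        rw [pvRuns_cons]
        by_cases h : prev = c
        · obtain ⟨t, ht⟩ := pvRuns_head cs prev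
          rw [if_pos h, ht, h]
          exact List.mem_cons_self
        · obtain ⟨t, ht⟩ := pvRuns_head cs c
          rw [if_neg h, ht]
          simp
      have hnd : ¬ (used ++ pvRuns prev (c :: cs)).Nodup := by
        intro h
        exact ((List.nodup_append.mp h).2.2) c hc c hmem rfl
      rw [if_pos hc]
      exact (decide_eq_false hnd).symm
    · rw [if_neg hc]
      by_cases hne : c = prev
      · subst hne
        rw [if_pos rfl, pvRuns_cons, if_pos rfl]
        exact ih c used hn hp
      · rw [if_neg hne, ih c (used ++ [prev]) (pvNodupSnoc used prev hn hp) (by simp [hc, hne]),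
          pvRuns_cons, if_neg (fun h => hne h.symm)]
        simp [List.append_assoc]

-- ofList is a sublist of its argument (via a generalized foldl statement)
theorem pvOfList_sublist (l : List Char) : ∀ s : List Char,
    ∃ t, l.foldl PySem.Set.add s = s ++ t ∧ t.Sublist l := by
  induction l with
  | nil => intro s; exact ⟨[], by simp⟩
  | cons a l ih =>
    intro s
    by_cases h : PySem.Set.contains s a
    · have ha : PySem.Set.add s a = s := by simp only [PySem.Set.add, if_pos h]
      obtain ⟨t, ht, hs⟩ := ih s
      exact ⟨t, by simpa [ha] using ht, hs.cons a⟩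
    · have ha : PySem.Set.add s a = s ++ [a] := by simp only [PySem.Set.add, if_neg h]
      obtain ⟨t, ht, hs⟩ := ih (s ++ [a])
      exact ⟨a :: t, by simpa [ha, List.append_assoc] using ht, hs.cons₂ a⟩

theorem pvNodup_ofList_self (l : List Char) (h : l.Nodup) : PySem.Set.ofList l = l := by
  suffices H : ∀ s : List Char, (s ++ l).Nodup → l.foldl PySem.Set.add s = s ++ l by
    simpa using H [] (by simpa using h)
  clear h
  induction l with
  | nil => intro s _; simp
  | cons a l ih =>
    intro s hs
    have ha : a ∉ s := fun hmem =>
      ((List.nodup_append.mp hs).2.2) a hmem a (List.mem_cons_self) rfl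
    have hadd : PySem.Set.add s a = s ++ [a] := by
      simp only [PySem.Set.add, PySem.Set.contains]
      rw [if_neg (by simpa using ha)]
    have hs' : (s ++ [a] ++ l).Nodup := by simpa [List.append_assoc] using hs
    calc (a :: l).foldl PySem.Set.add s = l.foldl PySem.Set.add (s ++ [a]) := by
          rw [List.foldl_cons, hadd]
      _ = s ++ [a] ++ l := ih (s ++ [a]) hs'
      _ = s ++ a :: l := by rw [List.append_assoc]; rfl

theorem pvLen_eq_iff (l : List Char) :
    (l.length == (PySem.Set.ofList l).length) = decide l.Nodup := by
  by_cases h : l.Nodup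
  · simp [pvNodup_ofList_self l h, h]
  · obtain ⟨t, ht, hs⟩ := pvOfList_sublist l []
    have hof : PySem.Set.ofList l = t := by simpa using ht
    have hne : t ≠ l := fun he => h (he ▸ hof ▸ PySem.Set.nodup_ofList l)
    have : t.length < l.length := lt_of_le_of_ne hs.length_le (fun hlen => hne (hs.eq_of_length hlen))
    simp [hof, h]
    omega

-- ===== VERDICT (by name: the statement is the Claim_ definition above) =====
theorem check_group_voca_spec : Claim_equal_check_group_voca := by
  intro s _
  unfold Spec_check_group_voca check_group_voca check_group_voca_alt
  match h : s.toList with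
  | [] => simp
  | c :: cs =>
    show checkGroupVocaLoopA cs c [] = _
    have hkeys : (c :: cs).foldl checkGroupVocaStepB [] = pvRuns c cs := by
      simp [pvRuns, checkGroupVocaStepB]
    rw [pvLoopA_eq cs c [] List.nodup_nil (List.not_mem_nil)]
    simp only [hkeys, pvLen_eq_iff]
    simp
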